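-- pv_equiv track=rewrite | github.com/981377660LMT/algorithm-study | 5_map/F - Rook Score (abc298 f).py | rookScore
-- ===== SOURCE A (Python) =====
-- from collections import defaultdict
-- from typing import Tuple, List
--
-- def rookScore(n: int, points: List[Tuple[int, int, int]]) -> int:
--     rowSum, colSum = defaultdict(int), defaultdict(int)
--     posSum = defaultdict(int)
--     for r, c, v in points:
--         rowSum[r] += v
--         colSum[c] += v
--         posSum[(r, c)] += v
--
--     res = 0
--
--     # !行列交界处有值
--     for (r, c), s in posSum.items():
--         res = max(res, rowSum[r] + colSum[c] - s)
--
--     # !行列交界处无值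
--     cols = [(c, s) for c, s in colSum.items()]
--     cols.sort(key=lambda x: x[1], reverse=True)
--     for r, s1 in rowSum.items():
--         for c, s2 in cols:
--             if (r, c) not in posSum:
--                 res = max(res, s1 + s2)
--                 break  # 最多n个
--     return res
-- ===== SOURCE B (Python) =====
-- from collections import defaultdict
-- from typing import Tuple, List
--
-- def rookScore(n: int, points: List[Tuple[int, int, int]]) -> int:
--     rowSum, colSum = defaultdict(int), defaultdict(int)
--     posSum = defaultdict(int)
--     for r, c, v in points:
--         rowSum[r] += v
--         colSum[c] += v
--         posSum[(r, c)] += v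
--     res = 0
--     for r, s1 in rowSum.items():
--         for c, s2 in colSum.items():
--             res = max(res, s1 + s2 - posSum.get((r, c), 0))
--     return res
-- ===== Notes on version B (the rewrite author's own statement) =====
-- stated objective: simpler
-- what changed: Replaced A's two-phase decomposition (a pass over occupied cells plus, per row, a scan of columns sorted by sum descending with an early break at the first non-conflicting column) by a single exhaustive double loop over distinct rows x distinct columns taking max(res, rowSum[r]+colSum[c]-posSum.get((r,c),0)).
import Mathlib
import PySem

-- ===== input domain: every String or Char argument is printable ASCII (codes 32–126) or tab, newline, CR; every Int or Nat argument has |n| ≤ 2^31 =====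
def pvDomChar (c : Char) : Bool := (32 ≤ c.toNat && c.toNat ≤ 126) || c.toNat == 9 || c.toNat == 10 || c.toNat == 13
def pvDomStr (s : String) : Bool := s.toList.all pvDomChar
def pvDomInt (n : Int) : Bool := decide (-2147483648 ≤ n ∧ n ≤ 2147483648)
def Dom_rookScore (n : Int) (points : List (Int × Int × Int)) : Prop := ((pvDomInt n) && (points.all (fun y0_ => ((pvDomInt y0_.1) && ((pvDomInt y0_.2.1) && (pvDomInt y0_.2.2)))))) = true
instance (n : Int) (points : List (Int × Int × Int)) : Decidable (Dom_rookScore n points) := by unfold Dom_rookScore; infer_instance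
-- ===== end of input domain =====

-- B replaces A's sort-plus-early-break second phase by one exhaustive double loop over
-- distinct rows × distinct columns (objective: simpler; not faster).

-- ===== PORT A =====
-- the inner 'for c, s2 in cols: if (r,c) not in posSum: res = max(res, s1+s2); break'
def rookInnerA (posSum : PySem.Dict (Int × Int) Int) (r s1 : Int) :
    List (Int × Int) → Int → Int
  | [], res => res
  | (c, s2) :: rest, res =>
    if posSum.contains (r, c) then rookInnerA posSum r s1 rest res
    else max res (s1 + s2)

def rookScore (n : Int) (points : List (Int × Int × Int)) : Int :=
  let sums := points.foldl
    (fun (st : PySem.Dict Int Int × PySem.Dict Int Int × PySem.Dict (Int × Int) Int) p =>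
      (st.1.modify p.1 0 (· + p.2.2), st.2.1.modify p.2.1 0 (· + p.2.2),
       st.2.2.modify (p.1, p.2.1) 0 (· + p.2.2)))
    (PySem.Dict.empty, PySem.Dict.empty, PySem.Dict.empty)
  let rowSum := sums.1
  let colSum := sums.2.1
  let posSum := sums.2.2
  let res := posSum.items.foldl
    (fun res q => max res (rowSum.getD q.1.1 0 + colSum.getD q.1.2 0 - q.2)) 0
  let cols := PySem.List.sorted colSum.items (fun x => x.2) true
  rowSum.items.foldl (fun res rp => rookInnerA posSum rp.1 rp.2 cols res) res

-- ===== PORT B =====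
def rookScore_alt (n : Int) (points : List (Int × Int × Int)) : Int :=
  let sums := points.foldl
    (fun (st : PySem.Dict Int Int × PySem.Dict Int Int × PySem.Dict (Int × Int) Int) p =>
      (st.1.modify p.1 0 (· + p.2.2), st.2.1.modify p.2.1 0 (· + p.2.2),
       st.2.2.modify (p.1, p.2.1) 0 (· + p.2.2)))
    (PySem.Dict.empty, PySem.Dict.empty, PySem.Dict.empty)
  let rowSum := sums.1
  let colSum := sums.2.1
  let posSum := sums.2.2
  rowSum.items.foldl (fun res rp =>
    colSum.items.foldl (fun res cp =>
      max res (rp.2 + cp.2 - posSum.getD (rp.1, cp.1) 0)) res) 0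

-- ===== PRECONDITION & SPEC =====
def Spec_rookScore (n : Int) (points : List (Int × Int × Int)) (out : Int) : Prop := out = rookScore_alt n points
instance (n : Int) (points : List (Int × Int × Int)) (out : Int) : Decidable (Spec_rookScore n points out) := by unfold Spec_rookScore; infer_instance

-- ===== CLAIM (what is proved, stated in full; the proofs are below) =====
def Claim_equal_rookScore : Prop := ∀ (n : Int) (points : List (Int × Int × Int)), Dom_rookScore n points → Spec_rookScore n points (rookScore n points)

-- ===== LEMMAS AND PROOFS =====

lemma build_split (points : List (Int × Int × Int))
    (a b : PySem.Dict Int Int) (c : PySem.Dict (Int × Int) Int) :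
    points.foldl
      (fun (st : PySem.Dict Int Int × PySem.Dict Int Int × PySem.Dict (Int × Int) Int) p =>
        (st.1.modify p.1 0 (· + p.2.2), st.2.1.modify p.2.1 0 (· + p.2.2),
         st.2.2.modify (p.1, p.2.1) 0 (· + p.2.2)))
      (a, b, c)
    = (points.foldl (fun d p => d.modify p.1 0 (· + p.2.2)) a,
       points.foldl (fun d p => d.modify p.2.1 0 (· + p.2.2)) b,
       points.foldl (fun d p => d.modify (p.1, p.2.1) 0 (· + p.2.2)) c) := by
  induction points generalizing a b c with
  | nil => rfl
  | cons p t ih => simpa [List.foldl] using ih _ _ _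

lemma le_foldl_self {β : Type} (g : Int → β → Int) (mono : ∀ a x, a ≤ g a x)
    (l : List β) (a : Int) : a ≤ l.foldl g a := by
  induction l generalizing a with
  | nil => simp
  | cons x t ih => exact le_trans (mono a x) (ih _)

lemma le_foldl_of_mem {β : Type} (g : Int → β → Int) (mono : ∀ a x, a ≤ g a x)
    {l : List β} {x : β} (hx : x ∈ l) (b : Int) (hb : ∀ a, b ≤ g a x) (a : Int) :
    b ≤ l.foldl g a := by
  induction l generalizing a with
  | nil => cases hx
  | cons y t ih =>
    rcases List.mem_cons.mp hx with h | h
    · subst h; exact le_trans (hb a) (le_foldl_self g mono t _)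
    · exact ih h _

lemma foldl_le {β : Type} (g : Int → β → Int) {l : List β} {b : Int}
    (hstep : ∀ a x, x ∈ l → a ≤ b → g a x ≤ b) : ∀ a, a ≤ b → l.foldl g a ≤ b := by
  induction l with
  | nil => intro a h; simpa using h
  | cons y t ih =>
    intro a h
    exact ih (fun a x hx => hstep a x (List.mem_cons_of_mem _ hx)) _
      (hstep a y (List.mem_cons_self ..) h)

lemma rookInnerA_ge (posSum : PySem.Dict (Int × Int) Int) (r s1 : Int)
    (cl : List (Int × Int)) (res : Int) : res ≤ rookInnerA posSum r s1 cl res := by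
  induction cl generalizing res with
  | nil => simp [rookInnerA]
  | cons p rest ih =>
    obtain ⟨c, s2⟩ := p
    simp only [rookInnerA]
    split
    · exact ih _
    · exact le_max_left _ _

lemma rookInnerA_le (posSum : PySem.Dict (Int × Int) Int) (r s1 : Int)
    {cl : List (Int × Int)} {b : Int}
    (hstep : ∀ c s2, (c, s2) ∈ cl → posSum.contains (r, c) = false → s1 + s2 ≤ b) :
    ∀ res, res ≤ b → rookInnerA posSum r s1 cl res ≤ b := by
  induction cl with
  | nil => intro res h; simpa [rookInnerA] using h
  | cons p rest ih =>
    intro res h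
    obtain ⟨c, s2⟩ := p
    simp only [rookInnerA]
    split
    · exact ih (fun c s2 hm => hstep c s2 (List.mem_cons_of_mem _ hm)) _ h
    · next hnc =>
      exact max_le h (hstep c s2 (List.mem_cons_self ..) (by simpa using hnc))

lemma rookInnerA_attains (posSum : PySem.Dict (Int × Int) Int) (r s1 : Int)
    {cl : List (Int × Int)} {c : Int} {s2 : Int}
    (hmem : (c, s2) ∈ cl) (hnc : posSum.contains (r, c) = false)
    (hpw : cl.Pairwise (fun a b => b.2 ≤ a.2)) (res : Int) :
    s1 + s2 ≤ rookInnerA posSum r s1 cl res := by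
  induction cl generalizing res with
  | nil => cases hmem
  | cons p rest ih =>
    obtain ⟨c0, t⟩ := p
    rw [List.pairwise_cons] at hpw
    simp only [rookInnerA]
    by_cases h : posSum.contains (r, c0) = true
    · rw [if_pos h]
      have hmem' : (c, s2) ∈ rest := by
        rcases List.mem_cons.mp hmem with he | he
        · exfalso
          obtain ⟨h1, h2⟩ := Prod.mk.injEq .. ▸ he
          rw [h1] at hnc; rw [hnc] at h; exact Bool.false_ne_true h
        · exact he
      exact ih hmem' hpw.2 res
    · rw [if_neg h]
      rcases List.mem_cons.mp hmem with he | he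
      · obtain ⟨h1, h2⟩ := Prod.mk.injEq .. ▸ he
        subst h2; exact le_max_right _ _
      · have hle : s2 ≤ t := hpw.1 _ he
        exact le_trans (by omega) (le_max_right res (s1 + t))

-- the core: for any dicts with Nodup keys whose occupied cells lie in rows × cols,
-- A's two-phase result equals B's product scan
lemma rook_main (rowSum colSum : PySem.Dict Int Int) (posSum : PySem.Dict (Int × Int) Int)
    (hnR : rowSum.keys.Nodup) (hnC : colSum.keys.Nodup) (hnP : posSum.keys.Nodup)
    (hcl : ∀ r c, (r, c) ∈ posSum.keys → r ∈ rowSum.keys ∧ c ∈ colSum.keys) :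
    rowSum.items.foldl
      (fun res rp => rookInnerA posSum rp.1 rp.2
        (PySem.List.sorted colSum.items (fun x => x.2) true) res)
      (posSum.items.foldl
        (fun res q => max res (rowSum.getD q.1.1 0 + colSum.getD q.1.2 0 - q.2)) 0)
    = rowSum.items.foldl (fun res rp =>
        colSum.items.foldl (fun res cp =>
          max res (rp.2 + cp.2 - posSum.getD (rp.1, cp.1) 0)) res) 0 := by
  set cl := PySem.List.sorted colSum.items (fun x => x.2) true with hcldef
  set fA : Int → ((Int × Int) × Int) → Int :=
    fun res q => max res (rowSum.getD q.1.1 0 + colSum.getD q.1.2 0 - q.2) with hfA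
  set gA : Int → (Int × Int) → Int :=
    fun res rp => rookInnerA posSum rp.1 rp.2 cl res with hgA
  set gB : Int → (Int × Int) → Int :=
    fun res rp => colSum.items.foldl (fun res cp =>
      max res (rp.2 + cp.2 - posSum.getD (rp.1, cp.1) 0)) res with hgB
  have monofA : ∀ a q, a ≤ fA a q := fun a q => le_max_left _ _
  have monogA : ∀ a rp, a ≤ gA a rp := fun a rp => rookInnerA_ge _ _ _ _ _
  have monogB : ∀ a rp, a ≤ gB a rp :=
    fun a rp => le_foldl_self _ (fun a cp => le_max_left _ _) _ _
  -- any B-candidate value is ≤ the B result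
  have hBattain : ∀ {r s1 c s2}, (r, s1) ∈ rowSum.items → (c, s2) ∈ colSum.items →
      ∀ a, s1 + s2 - posSum.getD (r, c) 0 ≤ rowSum.items.foldl gB a := by
    intro r s1 c s2 hr hc a
    refine le_foldl_of_mem gB monogB hr _ (fun a' => ?_) a
    simp only [hgB]
    exact le_foldl_of_mem
      (fun res cp => max res (s1 + cp.2 - posSum.getD (r, cp.1) 0))
      (fun a cp => le_max_left _ _) hc _ (fun a'' => le_max_right _ _) a'
  apply le_antisymm
  · -- A ≤ B
    refine foldl_le gA (fun a rp hrp ha => ?_) _ ?_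
    · -- phase-2 step stays ≤ B
      obtain ⟨r, s1⟩ := rp
      refine rookInnerA_le posSum r s1 (fun c s2 hm hnc => ?_) a ha
      have hcC : (c, s2) ∈ colSum.items := (PySem.List.mem_sorted _ _ _ _).mp hm
      have h0 : posSum.getD (r, c) 0 = 0 := PySem.Dict.getD_of_not_contains posSum 0 hnc
      have := hBattain hrp hcC 0
      omega
    · -- phase-1 result ≤ B
      refine foldl_le fA (fun a q hq ha => ?_) 0
        (le_foldl_self gB monogB _ 0)
      obtain ⟨⟨r, c⟩, s⟩ := q
      have hk : (r, c) ∈ posSum.keys := PySem.Dict.mem_keys_of_mem_items posSum hq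
      obtain ⟨hrK, hcK⟩ := hcl r c hk
      have hrI : (r, rowSum.getD r 0) ∈ rowSum.items := by
        rw [PySem.Dict.items_eq_map_keys rowSum hnR 0]
        exact List.mem_map.mpr ⟨r, hrK, rfl⟩
      have hcI : (c, colSum.getD c 0) ∈ colSum.items := by
        rw [PySem.Dict.items_eq_map_keys colSum hnC 0]
        exact List.mem_map.mpr ⟨c, hcK, rfl⟩
      have hs : posSum.getD (r, c) 0 = s := PySem.Dict.getD_of_mem_items posSum hq hnP 0
      have := hBattain hrI hcI 0
      simp only [hfA]
      have : rowSum.getD r 0 + colSum.getD c 0 - s ≤ rowSum.items.foldl gB 0 := by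
        omega
      exact max_le ha this
  · -- B ≤ A
    have hAinit : (0 : Int) ≤ rowSum.items.foldl gA (posSum.items.foldl fA 0) :=
      le_trans (le_foldl_self fA monofA _ 0) (le_foldl_self gA monogA _ _)
    refine foldl_le gB (fun a rp hrp ha => ?_) 0 hAinit
    obtain ⟨r, s1⟩ := rp
    refine foldl_le _ (fun a' cp hcp ha' => ?_) a ha
    obtain ⟨c, s2⟩ := cp
    dsimp only
    refine max_le ha' ?_
    by_cases h : posSum.contains (r, c) = true
    · -- occupied cell: phase-1 candidate
      have hk : (r, c) ∈ posSum.keys := (PySem.Dict.contains_iff_mem_keys _ _).mp h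
      have hqI : ((r, c), posSum.getD (r, c) 0) ∈ posSum.items := by
        rw [PySem.Dict.items_eq_map_keys posSum hnP 0]
        exact List.mem_map.mpr ⟨(r, c), hk, rfl⟩
      have hs1 : rowSum.getD r 0 = s1 := PySem.Dict.getD_of_mem_items rowSum hrp hnR 0
      have hs2 : colSum.getD c 0 = s2 := PySem.Dict.getD_of_mem_items colSum hcp hnC 0
      have h1 : s1 + s2 - posSum.getD (r, c) 0 ≤ posSum.items.foldl fA 0 := by
        refine le_foldl_of_mem fA monofA hqI _ (fun a => ?_) 0
        simp only [hfA, hs1, hs2]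
        exact le_max_right _ _
      exact le_trans h1 (le_foldl_self gA monogA _ _)
    · -- free cell: phase-2 reaches at least s1 + s2 for row r
      have hnc : posSum.contains (r, c) = false := by simpa using h
      have h0 : posSum.getD (r, c) 0 = 0 := PySem.Dict.getD_of_not_contains posSum 0 hnc
      have hmemcl : (c, s2) ∈ cl := (PySem.List.mem_sorted _ _ _ _).mpr hcp
      have hpw : cl.Pairwise (fun a b => b.2 ≤ a.2) :=
        PySem.List.sorted_pairwise_rev _ _
      have h1 : s1 + s2 ≤ rowSum.items.foldl gA (posSum.items.foldl fA 0) :=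
        le_foldl_of_mem gA monogA hrp _
          (fun a => rookInnerA_attains posSum r s1 hmemcl hnc hpw a) _
      omega

lemma rookScore_eq_main (n : Int) (points : List (Int × Int × Int)) :
    rookScore n points = rookScore_alt n points := by
  unfold rookScore rookScore_alt
  rw [build_split]
  set rowSum := points.foldl (fun d p => d.modify p.1 0 (· + p.2.2))
    (PySem.Dict.empty : PySem.Dict Int Int) with hR
  set colSum := points.foldl (fun d p => d.modify p.2.1 0 (· + p.2.2))
    (PySem.Dict.empty : PySem.Dict Int Int) with hC
  set posSum := points.foldl (fun d p => d.modify (p.1, p.2.1) 0 (· + p.2.2))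
    (PySem.Dict.empty : PySem.Dict (Int × Int) Int) with hP
  have hnR : rowSum.keys.Nodup := by
    rw [hR]
    exact PySem.Dict.nodup_keys_foldl_modify_key points (fun p => p.1) 0
      (fun _ p => (· + p.2.2)) _ PySem.Dict.nodup_keys_empty
  have hnC : colSum.keys.Nodup := by
    rw [hC]
    exact PySem.Dict.nodup_keys_foldl_modify_key points (fun p => p.2.1) 0
      (fun _ p => (· + p.2.2)) _ PySem.Dict.nodup_keys_empty
  have hnP : posSum.keys.Nodup := by
    rw [hP]
    exact PySem.Dict.nodup_keys_foldl_modify_key points (fun p => (p.1, p.2.1)) 0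
      (fun _ p => (· + p.2.2)) _ PySem.Dict.nodup_keys_empty
  have hkR : rowSum.keys = PySem.Set.ofList (points.map (fun p => p.1)) := by
    rw [hR, PySem.Dict.keys_foldl_modify_key, PySem.Dict.keys_empty,
      PySem.Set.update_nil_left]
  have hkC : colSum.keys = PySem.Set.ofList (points.map (fun p => p.2.1)) := by
    rw [hC, PySem.Dict.keys_foldl_modify_key, PySem.Dict.keys_empty,
      PySem.Set.update_nil_left]
  have hkP : posSum.keys = PySem.Set.ofList (points.map (fun p => (p.1, p.2.1))) := by
    rw [hP, PySem.Dict.keys_foldl_modify_key, PySem.Dict.keys_empty,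
      PySem.Set.update_nil_left]
  have hcl : ∀ r c, (r, c) ∈ posSum.keys → r ∈ rowSum.keys ∧ c ∈ colSum.keys := by
    intro r c hm
    rw [hkP, PySem.Set.mem_ofList] at hm
    obtain ⟨p, hp, hpe⟩ := List.mem_map.mp hm
    obtain ⟨h1, h2⟩ := Prod.mk.injEq .. ▸ hpe
    constructor
    · rw [hkR, PySem.Set.mem_ofList]; exact List.mem_map.mpr ⟨p, hp, h1⟩
    · rw [hkC, PySem.Set.mem_ofList]; exact List.mem_map.mpr ⟨p, hp, h2⟩
  exact rook_main rowSum colSum posSum hnR hnC hnP hcl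

-- ===== VERDICT (by name: the statement is the Claim_ definition above) =====
theorem rookScore_spec : Claim_equal_rookScore := by
  intro n points _
  exact rookScore_eq_main n points
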